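-- pv_equiv track=rewrite | github.com/shivasurya1999/Multi-Agent-Path-Finding | simulator/MDD.py | EliminateMDDFar
-- ===== SOURCE A (Python) =====
-- def EliminateMDDFar(current_layer,previous_layer): #eliminate the nodes of MDD which don't give shortest path to goal node
--     new_previous = []
--     for current_node in current_layer:
--         for previous_node in previous_layer:
--             diff_node = []
--             diff_node.append(abs(current_node[0]-previous_node[0]))
--             diff_node.append(abs(current_node[1]-previous_node[1]))
--             if(abs(diff_node[0]+diff_node[1])==1):
--                 new_previous.append(previous_node)
--     return new_previous
-- ===== SOURCE B (Python) =====
-- def EliminateMDDFar(current_layer, previous_layer):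
--     # Index previous_layer by position once; per current node probe only its 4
--     # neighbor cells and merge the hits back into previous_layer order.
--     buckets = {}
--     for i, p in enumerate(previous_layer):
--         buckets.setdefault((p[0], p[1]), []).append((i, (p[0], p[1])))
--     out = []
--     for c in current_layer:
--         x, y = c[0], c[1]
--         cands = []
--         for nb in ((x - 1, y), (x + 1, y), (x, y - 1), (x, y + 1)):
--             cands += buckets.get(nb, [])
--         cands.sort(key=lambda t: t[0])
--         for _, p in cands:
--             out.append(p)
--     return out
-- ===== Notes on version B (the rewrite author's own statement) =====
-- stated objective: faster
-- what changed: Replaces the nested scan of previous_layer for every current node by a hash index of previous_layer positions built once; each current node probes only its 4 neighbor cells and the hits are merged back into previous_layer order by index.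
import Mathlib
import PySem

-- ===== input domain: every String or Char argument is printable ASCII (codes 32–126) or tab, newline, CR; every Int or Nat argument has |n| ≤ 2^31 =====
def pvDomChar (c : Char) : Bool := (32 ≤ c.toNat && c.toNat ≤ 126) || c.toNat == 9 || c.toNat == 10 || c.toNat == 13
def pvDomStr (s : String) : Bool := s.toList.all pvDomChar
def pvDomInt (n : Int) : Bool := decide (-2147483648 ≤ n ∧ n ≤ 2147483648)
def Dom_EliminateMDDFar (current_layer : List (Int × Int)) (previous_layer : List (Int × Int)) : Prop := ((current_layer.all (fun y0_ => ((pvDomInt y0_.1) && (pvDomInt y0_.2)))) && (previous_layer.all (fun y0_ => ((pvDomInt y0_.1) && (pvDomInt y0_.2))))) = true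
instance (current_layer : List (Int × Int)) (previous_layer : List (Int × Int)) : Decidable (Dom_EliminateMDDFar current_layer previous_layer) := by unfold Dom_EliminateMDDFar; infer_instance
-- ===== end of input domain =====

-- B replaces A's per-current-node scan of previous_layer by a hash index of
-- previous_layer positions built once; each current node probes its 4 neighbor
-- cells and merges the hits back into previous_layer order by index (objective: faster).

-- ===== PORT A =====
def EliminateMDDFar (current_layer : List (Int × Int)) (previous_layer : List (Int × Int)) : List (Int × Int) :=
  current_layer.foldl (fun new_previous current_node =>
    previous_layer.foldl (fun new_previous previous_node =>
      let d0 : Int := |current_node.1 - previous_node.1|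
      let d1 : Int := |current_node.2 - previous_node.2|
      if |d0 + d1| = 1 then new_previous ++ [previous_node] else new_previous)
      new_previous) []

-- ===== PORT B =====
def EliminateMDDFar_alt (current_layer : List (Int × Int)) (previous_layer : List (Int × Int)) : List (Int × Int) :=
  -- buckets: position ↦ list of (index, node); setdefault(..,[]).append(t) = modify .. [] (· ++ [t])
  let buckets : PySem.Dict (Int × Int) (List (Int × (Int × Int))) :=
    (PySem.List.enumerate previous_layer).foldl
      (fun d ip => d.modify ip.2 [] (· ++ [ip])) PySem.Dict.empty
  current_layer.foldl (fun out c =>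
    let cands :=
      [(c.1 - 1, c.2), (c.1 + 1, c.2), (c.1, c.2 - 1), (c.1, c.2 + 1)].foldl
        (fun acc nb => acc ++ buckets.getD nb []) []
    let s := PySem.List.sorted cands (fun t => t.1) false
    s.foldl (fun out t => out ++ [t.2]) out) []

-- ===== PRECONDITION & SPEC =====
def Spec_EliminateMDDFar (current_layer : List (Int × Int)) (previous_layer : List (Int × Int)) (out : List (Int × Int)) : Prop := out = EliminateMDDFar_alt current_layer previous_layer
instance (current_layer : List (Int × Int)) (previous_layer : List (Int × Int)) (out : List (Int × Int)) : Decidable (Spec_EliminateMDDFar current_layer previous_layer out) := by unfold Spec_EliminateMDDFar; infer_instance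

-- ===== CLAIM (what is proved, stated in full; the proofs are below) =====
def Claim_equal_EliminateMDDFar : Prop := ∀ (current_layer : List (Int × Int)) (previous_layer : List (Int × Int)), Dom_EliminateMDDFar current_layer previous_layer → Spec_EliminateMDDFar current_layer previous_layer (EliminateMDDFar current_layer previous_layer)

-- ===== LEMMAS AND PROOFS =====

-- |‖dx‖+‖dy‖| = 1 exactly at the four neighbor cells
theorem pv_dist_one_iff (x y a b : Int) :
    (|(|x - a| + |y - b|)| = 1) ↔
      ((a = x - 1 ∧ b = y) ∨ (a = x + 1 ∧ b = y) ∨ (a = x ∧ b = y - 1) ∨ (a = x ∧ b = y + 1)) := by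
  simp only [Int.abs_eq_natAbs]
  omega

-- filter of a disjunction of disjoint tests is a permutation of the two filters concatenated
theorem pv_filter_or_perm {α : Type} (p q : α → Bool) (l : List α)
    (h : ∀ x, ¬(p x = true ∧ q x = true)) :
    (l.filter (fun x => p x || q x)).Perm (l.filter p ++ l.filter q) := by
  induction l with
  | nil => simp
  | cons x xs ih =>
    by_cases hp : p x = true
    · have hq : q x = false := by have := h x; simp [hp] at this; simp [this]
      simpa [List.filter_cons, hp, hq] using ih.cons x
    · have hp' : p x = false := by simp [hp]
      by_cases hq : q x = true
      · simp only [List.filter_cons, hp', hq, Bool.false_or]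
        exact (ih.cons x).trans (List.perm_middle.symm)
      · have hq' : q x = false := by simp [hq]
        simpa [List.filter_cons, hp', hq'] using ih

-- two distinct target cells give disjoint bucket tests
theorem pv_disj (u v : Int × Int) (huv : u ≠ v) (ip : Int × (Int × Int)) :
    ¬((ip.2 == u) = true ∧ (ip.2 == v) = true) := by
  rintro ⟨h1, h2⟩
  rw [beq_iff_eq] at h1 h2
  exact huv (h1 ▸ h2)

-- the bucket dict built by B: lookup = the matching (index, node) pairs in order
theorem pv_bucket (pl : List (Int × Int)) (c : Int × Int) :
    (((PySem.List.enumerate pl).foldl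
        (fun d ip => d.modify ip.2 [] (· ++ [ip])) PySem.Dict.empty).getD c []) =
      (PySem.List.enumerate pl).filter (fun ip => ip.2 == c) := by
  have hmap : (PySem.List.enumerate pl).foldl
      (fun d ip => d.modify ip.2 [] (· ++ [ip])) PySem.Dict.empty
      = ((PySem.List.enumerate pl).map (fun ip => (ip.2, ip))).foldl
          (fun d p => d.modify p.1 [] (· ++ [p.2])) PySem.Dict.empty := by
    rw [List.foldl_map]
  rw [hmap, PySem.Dict.getD_foldl_modify_append, List.filter_map]
  simp [Function.comp_def]

-- per current node: sorted candidate merge = the A-side filter of previous_layer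
theorem pv_per_node (pl : List (Int × Int)) (c : Int × Int) :
    (PySem.List.sorted
        ([(c.1 - 1, c.2), (c.1 + 1, c.2), (c.1, c.2 - 1), (c.1, c.2 + 1)].flatMap
          (fun nb =>
            (((PySem.List.enumerate pl).foldl
                (fun d ip => d.modify ip.2 [] (· ++ [ip])) PySem.Dict.empty).getD nb [])))
        (fun t => t.1) false).map Prod.snd
      = pl.filter (fun p => decide (|(|c.1 - p.1| + |c.2 - p.2|)| = 1)) := by
  obtain ⟨x, y⟩ := c
  set e := PySem.List.enumerate pl with he
  set ys := e.filter (fun ip => ip.2 == ((x : Int) - 1, y) || ip.2 == (x + 1, y) ||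
      ip.2 == (x, y - 1) || ip.2 == (x, y + 1)) with hys
  have hcands : ([((x : Int) - 1, y), (x + 1, y), (x, y - 1), (x, y + 1)].flatMap
      (fun nb => (e.foldl (fun d ip => d.modify ip.2 [] (· ++ [ip])) PySem.Dict.empty).getD nb []))
      = ((e.filter (fun ip => ip.2 == ((x : Int) - 1, y)) ++ e.filter (fun ip => ip.2 == (x + 1, y)))
        ++ e.filter (fun ip => ip.2 == (x, y - 1))) ++ e.filter (fun ip => ip.2 == (x, y + 1)) := by
    simp only [List.flatMap_cons, List.flatMap_nil, he, pv_bucket, List.append_nil, List.append_assoc]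
  have P12 := pv_filter_or_perm (fun ip => ip.2 == ((x : Int) - 1, y)) (fun ip => ip.2 == (x + 1, y)) e
      (pv_disj _ _ (by intro hh; rw [Prod.mk.injEq] at hh; omega))
  have P123 := pv_filter_or_perm (fun ip => ip.2 == ((x : Int) - 1, y) || ip.2 == (x + 1, y))
      (fun ip => ip.2 == (x, y - 1)) e (by
        rintro ip ⟨h1, h2⟩
        simp only [Bool.or_eq_true] at h1
        rcases h1 with h | h
        · exact pv_disj _ _ (by intro hh; rw [Prod.mk.injEq] at hh; omega) ip ⟨h, h2⟩
        · exact pv_disj _ _ (by intro hh; rw [Prod.mk.injEq] at hh; omega) ip ⟨h, h2⟩)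
  have P1234 := pv_filter_or_perm
      (fun ip => ip.2 == ((x : Int) - 1, y) || ip.2 == (x + 1, y) || ip.2 == (x, y - 1))
      (fun ip => ip.2 == (x, y + 1)) e (by
        rintro ip ⟨h1, h2⟩
        simp only [Bool.or_eq_true] at h1
        rcases h1 with h | h
        · rcases h with h' | h'
          · exact pv_disj _ _ (by intro hh; rw [Prod.mk.injEq] at hh; omega) ip ⟨h', h2⟩
          · exact pv_disj _ _ (by intro hh; rw [Prod.mk.injEq] at hh; omega) ip ⟨h', h2⟩
        · exact pv_disj _ _ (by intro hh; rw [Prod.mk.injEq] at hh; omega) ip ⟨h, h2⟩)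
  have hperm : ys.Perm (((e.filter (fun ip => ip.2 == ((x : Int) - 1, y)) ++ e.filter (fun ip => ip.2 == (x + 1, y)))
      ++ e.filter (fun ip => ip.2 == (x, y - 1))) ++ e.filter (fun ip => ip.2 == (x, y + 1))) :=
    P1234.trans (((P123.trans (P12.append_right _)).append_right _))
  have hpair : ys.Pairwise (fun a b => (fun t : Int × (Int × Int) => t.1) a < (fun t => t.1) b) :=
    List.Pairwise.sublist List.filter_sublist (PySem.List.pairwise_lt_enumerate pl 0)
  have hsorted := PySem.List.sorted_eq_of_perm_of_pairwise_lt
      (xs := ([((x : Int) - 1, y), (x + 1, y), (x, y - 1), (x, y + 1)].flatMap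
        (fun nb => (e.foldl (fun d ip => d.modify ip.2 [] (· ++ [ip])) PySem.Dict.empty).getD nb [])))
      (ys := ys) (key := fun t => t.1)
      (by rw [hcands]; exact hperm) hpair
  rw [hsorted, hys]
  have hcond : e.filter (fun ip => ip.2 == ((x : Int) - 1, y) || ip.2 == (x + 1, y) ||
      ip.2 == (x, y - 1) || ip.2 == (x, y + 1))
      = e.filter (fun ip => (fun p : Int × Int => decide (|(|x - p.1| + |y - p.2|)| = 1)) ip.2) := by
    refine List.filter_congr ?_
    intro ip _
    rw [Bool.eq_iff_iff]
    simp only [Bool.or_eq_true, beq_iff_eq, Prod.ext_iff, decide_eq_true_eq, pv_dist_one_iff]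
    tauto
  have hcomp : (fun ip : Int × (Int × Int) => (fun p : Int × Int => decide (|(|x - p.1| + |y - p.2|)| = 1)) ip.2)
      = ((fun p : Int × Int => decide (|(|x - p.1| + |y - p.2|)| = 1)) ∘ Prod.snd) := rfl
  rw [hcond, hcomp, ← List.filter_map, he, PySem.List.map_snd_enumerate]

-- ===== VERDICT (by name: the statement is the Claim_ definition above) =====
theorem EliminateMDDFar_spec : Claim_equal_EliminateMDDFar := by
  intro cl pl _
  unfold Spec_EliminateMDDFar EliminateMDDFar EliminateMDDFar_alt
  simp only [PySem.List.foldl_append_ite_eq_filter, PySem.List.foldl_append_singleton_eq_map,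
    PySem.List.foldl_append_eq_flatMap, List.nil_append]
  exact congrArg cl.flatMap (funext fun c => (pv_per_node pl c).symm)
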